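-- pv_equiv track=rewrite | github.com/marleydowling/marley_dowling_uw_masc_thesis | thesis-pclca/scripts/uncertainty_lcia/contemp/background_uncertainty/ms-fsc/build_msfsc_contemp_uncertainty_v1_2026.02.23.py | find_best_contains
-- ===== SOURCE A (Python) =====
-- from typing import Any, Dict, List, Optional, Tuple
--
-- def _lower(s: str) -> str:
--     return (s or "").strip().lower()
--
-- def loc_score(loc: str) -> int:
--     if not loc:
--         return 0
--     if loc == "IAI Area, North America":
--         return 110
--     if loc == "CA":
--         return 105
--     if loc.startswith("CA-"):
--         return 100
--     if loc == "RNA":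
--         return 90
--     if loc == "RoW":
--         return 80
--     if loc == "GLO":
--         return 75
--     return 40
--
-- def find_best_contains(bg_db, must_contain: List[str], exclude: Optional[List[str]] = None):
--     mc = [_lower(x) for x in must_contain]
--     ex = [_lower(x) for x in (exclude or [])]
--
--     matches = []
--     for a in bg_db:
--         nm = _lower(a.get("name"))
--         if all(x in nm for x in mc) and not any(bad in nm for bad in ex):
--             matches.append(a)
--
--     if not matches:
--         return None
--
--     return max(matches, key=lambda a: loc_score(a.get("location") or "") + len(mc))
-- ===== SOURCE B (Python) =====
-- def _lower(s: str) -> str: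
--     return (s or "").strip().lower()
--
-- def loc_score(loc: str) -> int:
--     if not loc:
--         return 0
--     if loc == "IAI Area, North America":
--         return 110
--     if loc == "CA":
--         return 105
--     if loc.startswith("CA-"):
--         return 100
--     if loc == "RNA":
--         return 90
--     if loc == "RoW":
--         return 80
--     if loc == "GLO":
--         return 75
--     return 40
--
-- def find_best_contains(bg_db, must_contain, exclude=None):
--     mc = [_lower(x) for x in must_contain]
--     ex = [_lower(x) for x in (exclude or [])]
--
--     def ok(a):
--         nm = _lower(a.get("name"))
--         return all(x in nm for x in mc) and not any(bad in nm for bad in ex)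
--
--     # loc_score only ever returns one of these values; scan tiers from best
--     # to worst and return the first matching item at the first inhabited tier.
--     for tier in (110, 105, 100, 90, 80, 75, 40, 0):
--         for a in bg_db:
--             if loc_score(a.get("location") or "") == tier and ok(a):
--                 return a
--     return None
-- ===== Notes on version B (the rewrite author's own statement) =====
-- stated objective: alternative
-- what changed: Instead of filtering into a list and taking max(..., key=score+len(mc)), B exploits that loc_score's range is the fixed set {110,105,100,90,80,75,40,0}: it scans these score tiers best-first and returns the first db item that matches the substring filters at the first inhabited tier, so no max/argmax or score comparison is ever performed.
import Mathlib
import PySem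

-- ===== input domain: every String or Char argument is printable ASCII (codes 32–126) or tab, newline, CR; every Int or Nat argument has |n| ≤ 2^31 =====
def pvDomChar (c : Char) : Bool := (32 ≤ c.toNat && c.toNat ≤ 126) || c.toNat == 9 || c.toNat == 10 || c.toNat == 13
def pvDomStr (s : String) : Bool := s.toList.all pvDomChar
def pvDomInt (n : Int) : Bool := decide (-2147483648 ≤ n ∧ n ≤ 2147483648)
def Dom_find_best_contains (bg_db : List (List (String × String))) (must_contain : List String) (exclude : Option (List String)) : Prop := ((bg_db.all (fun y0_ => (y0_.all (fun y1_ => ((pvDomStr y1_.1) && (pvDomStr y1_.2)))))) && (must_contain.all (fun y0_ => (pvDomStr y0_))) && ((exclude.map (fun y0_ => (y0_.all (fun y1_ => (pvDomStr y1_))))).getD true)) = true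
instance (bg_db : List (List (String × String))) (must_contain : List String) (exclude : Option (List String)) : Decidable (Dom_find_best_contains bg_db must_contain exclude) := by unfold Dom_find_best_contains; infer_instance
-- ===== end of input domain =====

-- B replaces A's filter-then-max(..., key=...) with a priority-ladder search: loc_score's range is the
-- fixed set {110,105,100,90,80,75,40,0}, so B scans these tiers best-first and returns the first
-- matching item at the first inhabited tier (objective: alternative algorithm, no max/argmax needed).

-- shared module helpers (_lower and loc_score exist identically in both Python sources)
def pvLower (s : String) : String := PySem.Str.lower (PySem.Str.strip s)

def pvLocScore (loc : String) : Int :=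
  if loc = "" then 0
  else if loc = "IAI Area, North America" then 110
  else if loc = "CA" then 105
  else if PySem.Str.startswith loc "CA-" then 100
  else if loc = "RNA" then 90
  else if loc = "RoW" then 80
  else if loc = "GLO" then 75
  else 40

-- ===== PORT A =====
def find_best_contains (bg_db : List (List (String × String))) (must_contain : List String) (exclude : Option (List String)) : Option (List (String × String)) :=
  let mc := must_contain.map pvLower
  let ex := (exclude.getD []).map pvLower
  let matchList := bg_db.foldl (fun acc a =>
    let nm := pvLower ((a.lookup "name").getD "")
    if (mc.all fun x => PySem.Str.isIn x nm) && !(ex.any fun bad => PySem.Str.isIn bad nm)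
    then acc ++ [a] else acc) []
  if matchList = [] then none
  else PySem.List.max? matchList (fun a => pvLocScore ((a.lookup "location").getD "") + (mc.length : Int))

-- ===== PORT B =====
-- B's nested loops: outer over the tier tuple, inner 'for a in bg_db: if …: return a' = List.find?
def pvTierScan {α : Type} (q : Int → α → Bool) : List Int → List α → Option α
  | [], _ => none
  | t :: ts, l =>
    match l.find? (q t) with
    | some a => some a
    | none => pvTierScan q ts l

def find_best_contains_alt (bg_db : List (List (String × String))) (must_contain : List String) (exclude : Option (List String)) : Option (List (String × String)) :=
  let mc := must_contain.map pvLower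
  let ex := (exclude.getD []).map pvLower
  pvTierScan (fun tier a =>
      (pvLocScore ((a.lookup "location").getD "") == tier) &&
      (let nm := pvLower ((a.lookup "name").getD "")
       (mc.all fun x => PySem.Str.isIn x nm) && !(ex.any fun bad => PySem.Str.isIn bad nm)))
    [110, 105, 100, 90, 80, 75, 40, 0] bg_db

-- ===== PRECONDITION & SPEC =====
def Spec_find_best_contains (bg_db : List (List (String × String))) (must_contain : List String) (exclude : Option (List String)) (out : Option (List (String × String))) : Prop := out = find_best_contains_alt bg_db must_contain exclude
instance (bg_db : List (List (String × String))) (must_contain : List String) (exclude : Option (List String)) (out : Option (List (String × String))) : Decidable (Spec_find_best_contains bg_db must_contain exclude out) := by unfold Spec_find_best_contains; infer_instance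

-- ===== CLAIM (what is proved, stated in full; the proofs are below) =====
def Claim_equal_find_best_contains : Prop := ∀ (bg_db : List (List (String × String))) (must_contain : List String) (exclude : Option (List String)), Dom_find_best_contains bg_db must_contain exclude → Spec_find_best_contains bg_db must_contain exclude (find_best_contains bg_db must_contain exclude)

-- ===== LEMMAS AND PROOFS =====

-- A's append loop builds the filtered list
theorem pv_foldl_append {α : Type} (p : α → Bool) :
    ∀ (l : List α) (acc : List α),
      l.foldl (fun acc x => if p x then acc ++ [x] else acc) acc = acc ++ l.filter p := by
  intro l
  induction l with
  | nil => intro acc; simp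
  | cons a t ih =>
    intro acc
    by_cases h : p a <;> simp [List.foldl_cons, h, ih]

-- Python's max(key) on a nonempty list is the running first-argmax loop
theorem pv_max {α : Type} (key : α → Int) :
    ∀ (t : List α) (a : α),
      PySem.List.max? (a :: t) key
      = some (t.foldl (fun b x => if key b < key x then x else b) a) := by
  intro t
  induction t with
  | nil => intro a; simp [PySem.List.max?]
  | cons x t ih =>
    intro a
    have h1 : PySem.List.max? (a :: x :: t) key
        = PySem.List.max? ((if key a < key x then x else a) :: t) key := by
      by_cases h : key a < key x <;> simp [PySem.List.max?, List.foldl_cons, h]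
    rw [h1, ih]
    by_cases h : key a < key x <;> simp [List.foldl_cons, h]

-- the constant +len(mc) in A's key does not change the argmax
theorem pv_shift {α : Type} (sc : α → Int) (c : Int) :
    ∀ (ms : List α) (m : α),
      ms.foldl (fun b a => if sc b + c < sc a + c then a else b) m
      = ms.foldl (fun b a => if sc b < sc a then a else b) m := by
  intro ms m
  have : (fun (b a : α) => if sc b + c < sc a + c then a else b)
       = (fun (b a : α) => if sc b < sc a then a else b) := by
    funext b a
    simp [add_lt_add_iff_right]
  rw [this]

-- the first-argmax of m :: t is the first element achieving the maximal score
theorem pv_argmax {α : Type} (sc : α → Int) :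
    ∀ (t : List α) (m : α),
      (m :: t).find? (fun a => sc a == sc (t.foldl (fun b x => if sc b < sc x then x else b) m))
          = some (t.foldl (fun b x => if sc b < sc x then x else b) m)
      ∧ ∀ a ∈ m :: t, sc a ≤ sc (t.foldl (fun b x => if sc b < sc x then x else b) m) := by
  intro t
  induction t with
  | nil => intro m; simp
  | cons x t ih =>
    intro m
    simp only [List.foldl_cons]
    by_cases h : sc m < sc x
    · have IH := ih x
      simp only [if_pos h]
      have hxr := IH.2 x (by simp)
      constructor
      · rw [List.find?_cons_of_neg (by simp only [beq_iff_eq]; omega)]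
        exact IH.1
      · intro a ha
        rcases List.mem_cons.mp ha with rfl | ha'
        · omega
        · exact IH.2 a ha'
    · have IH := ih m
      simp only [if_neg h]
      have hxm : sc x ≤ sc m := by omega
      have hmr := IH.2 m (by simp)
      constructor
      · by_cases hm : sc m = sc (t.foldl (fun b x => if sc b < sc x then x else b) m)
        · rw [List.find?_cons_of_pos (by simpa using hm)]
          have h1 := IH.1
          rw [List.find?_cons_of_pos (by simpa using hm)] at h1
          exact h1
        · have hmlt : sc m < sc (t.foldl (fun b x => if sc b < sc x then x else b) m) := by omega
          rw [List.find?_cons_of_neg (by simp only [beq_iff_eq]; omega),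
              List.find?_cons_of_neg (by simp only [beq_iff_eq]; omega)]
          have h1 := IH.1
          rw [List.find?_cons_of_neg (by simp only [beq_iff_eq]; omega)] at h1
          exact h1
      · intro a ha
        rcases List.mem_cons.mp ha with rfl | ha'
        · omega
        · rcases List.mem_cons.mp ha' with rfl | ha''
          · omega
          · exact IH.2 a (by simp [ha''])

-- the running first-argmax is an element of the list it runs over
theorem pv_foldl_mem {α : Type} (sc : α → Int) :
    ∀ (u : List α) (m : α),
      u.foldl (fun b x => if sc b < sc x then x else b) m ∈ m :: u := by
  intro u
  induction u with
  | nil => intro m; simp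
  | cons x u ihx =>
    intro m
    simp only [List.foldl_cons]
    by_cases h : sc m < sc x
    · simp only [if_pos h]
      rcases List.mem_cons.mp (ihx x) with h' | h' <;> simp [h']
    · simp only [if_neg h]
      rcases List.mem_cons.mp (ihx m) with h' | h' <;> simp [h']

-- inner combined test over bg_db = plain score test over the filtered list
theorem pv_find_filter {α : Type} (p q : α → Bool) :
    ∀ (l : List α), l.find? (fun a => q a && p a) = (l.filter p).find? q := by
  intro l
  induction l with
  | nil => simp
  | cons a t ih =>
    by_cases hp : p a
    · by_cases hq : q a <;> simp [hp, hq, ih]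
    · simp [hp, ih]

theorem pv_tierScan_filter {α : Type} (sc : α → Int) (p : α → Bool) :
    ∀ (ts : List Int) (l : List α),
      pvTierScan (fun t a => (sc a == t) && p a) ts l
        = pvTierScan (fun t a => sc a == t) ts (l.filter p) := by
  intro ts
  induction ts with
  | nil => intro l; rfl
  | cons t ts ih =>
    intro l
    simp only [pvTierScan, pv_find_filter (p := p) (q := fun a => sc a == t), ih]

theorem pv_tierScan_nil {α : Type} (q : Int → α → Bool) :
    ∀ (ts : List Int), pvTierScan q ts [] = none := by
  intro ts
  induction ts with
  | nil => rfl
  | cons t ts ih => simp [pvTierScan, ih]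

-- scanning strictly descending tiers that cover all scores finds exactly the first argmax
theorem pv_tierScan_max {α : Type} (sc : α → Int) :
    ∀ (tiers : List Int), tiers.Pairwise (· > ·) →
      ∀ (ms : List α) (r : α), r ∈ ms →
        (∀ a ∈ ms, sc a ≤ sc r) →
        (∀ a ∈ ms, sc a ∈ tiers) →
        ms.find? (fun a => sc a == sc r) = some r →
        pvTierScan (fun t a => sc a == t) tiers ms = some r := by
  intro tiers
  induction tiers with
  | nil =>
    intro _ ms r hr _ hmem _
    exact absurd (hmem r hr) (by simp)
  | cons t ts ih =>
    intro hpw ms r hr hle hmem hfind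
    have hpw' := (List.pairwise_cons.mp hpw).2
    have hts := (List.pairwise_cons.mp hpw).1
    by_cases hrt : sc r = t
    · simp only [pvTierScan]
      rw [hrt] at hfind
      simp [hfind]
    · have hrts : sc r ∈ ts := by
        rcases List.mem_cons.mp (hmem r hr) with h' | h'
        · exact absurd h' hrt
        · exact h'
      have hrlt : sc r < t := hts _ hrts
      have hnone : ms.find? (fun a => sc a == t) = none := by
        apply List.find?_eq_none.mpr
        intro a ha
        have := hle a ha
        simp only [beq_iff_eq]
        omega
      simp only [pvTierScan, hnone]
      apply ih hpw' ms r hr hle _ hfind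
      intro a ha
      have h1 := hmem a ha
      have h2 : sc a < t := by have := hle a ha; omega
      rcases List.mem_cons.mp h1 with h' | h'
      · omega
      · exact h'

-- ===== VERDICT (by name: the statement is the Claim_ definition above) =====
theorem find_best_contains_spec : Claim_equal_find_best_contains := by
  intro bg_db must_contain exclude _
  show find_best_contains bg_db must_contain exclude
     = find_best_contains_alt bg_db must_contain exclude
  unfold find_best_contains find_best_contains_alt
  simp only []
  rw [pv_foldl_append, List.nil_append,
      pv_tierScan_filter (sc := fun a => pvLocScore (((a : List (String × String)).lookup "location").getD ""))]
  generalize List.filter _ bg_db = ms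
  cases ms with
  | nil => rw [if_pos rfl, pv_tierScan_nil]
  | cons a t =>
    rw [if_neg (List.cons_ne_nil a t), pv_max, pv_shift]
    have H := pv_argmax (fun a => pvLocScore (((a : List (String × String)).lookup "location").getD "")) t a
    refine (pv_tierScan_max _ [110, 105, 100, 90, 80, 75, 40, 0] (by decide) (a :: t) _ ?_ H.2 ?_ H.1).symm
    · exact pv_foldl_mem _ t a
    · intro x _
      unfold pvLocScore
      split_ifs <;> decide
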